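-- pv_equiv track=rewrite | github.com/AP-MI-2021/seminar-2-ioana637 | pb2.py | determinare_cea_mai_lunga_secv_v2
-- ===== SOURCE A (Python) =====
-- def nr_div_10(nr):
--     '''
--     Verifica ca nr sa fie divizbil cu 10
--     :param nr: nr intreg
--     :return: True daca nr e divizibil cu 10, False altfel
--     '''
--     return nr % 10 == 0
--
-- def list_elem_div_10(lista):
--     '''
--     Verificam ca lista are doar elemente cu propr. div 10
--     :param lista: lista de nr intregi
--     :return: True daca lista are are doar elem div 10, False altfel
--     '''
--     for x in lista:
--         if not nr_div_10(x):
--             return False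
--     return True
--
-- def determinare_cea_mai_lunga_secv_v2(lista):
--     '''
--     Determinarea secventa cea mai lunga cu prop ca nr sunt divizibile cu 10
--     :param lista: lista de nr intregi
--     :return: rez lista care reprezinta secventa de lungime maxima
--     cu prop ca nr sunt divizibile cu 10
--     '''
--     rez = []
--     lung_lista = len(lista)
--     for i in range(lung_lista):
--         for j in range(i, lung_lista):
--             list_de_verificat = lista[i:j+1]
--             if list_elem_div_10(list_de_verificat) and len(list_de_verificat) > len(rez):
--                 rez = list_de_verificat[:]
--     return rez
-- ===== SOURCE B (Python) =====
-- def determinare_cea_mai_lunga_secv_v2(lista):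
--     '''
--     Determinarea secventa cea mai lunga cu prop ca nr sunt divizibile cu 10
--     :param lista: lista de nr intregi
--     :return: rez lista care reprezinta secventa de lungime maxima
--     cu prop ca nr sunt divizibile cu 10
--     '''
--     best = []
--     cur = []
--     for x in lista:
--         if x % 10 == 0:
--             cur.append(x)
--             if len(cur) > len(best):
--                 best = cur[:]
--         else:
--             cur = []
--     return best
-- ===== Notes on version B (the rewrite author's own statement) =====
-- stated objective: faster
-- what changed: Replaced A's triple-nested scan (all (i,j) pairs, slicing and re-checking divisibility of every subsegment) by a single left-to-right pass that extends the current run of multiples of 10 and records the first longest run.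
import Mathlib
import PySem

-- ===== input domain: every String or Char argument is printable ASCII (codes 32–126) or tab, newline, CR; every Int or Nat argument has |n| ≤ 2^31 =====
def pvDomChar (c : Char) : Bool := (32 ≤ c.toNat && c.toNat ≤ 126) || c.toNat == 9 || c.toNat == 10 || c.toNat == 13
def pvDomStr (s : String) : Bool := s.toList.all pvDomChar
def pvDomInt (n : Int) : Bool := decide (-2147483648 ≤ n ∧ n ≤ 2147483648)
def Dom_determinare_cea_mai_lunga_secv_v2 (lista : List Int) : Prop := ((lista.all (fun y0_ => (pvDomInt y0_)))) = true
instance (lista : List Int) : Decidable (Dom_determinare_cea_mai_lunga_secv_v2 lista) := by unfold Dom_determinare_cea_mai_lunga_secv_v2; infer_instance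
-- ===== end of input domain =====

-- B replaces A's cubic scan over all (i, j) subsegments by a single left-to-right pass
-- that extends the current run of multiples of 10 and keeps the first longest run seen.

-- ===== PORT A =====
def nr_div_10 (nr : Int) : Bool := PySem.Int.mod nr 10 == 0

def list_elem_div_10 : List Int → Bool
  | [] => true
  | x :: xs => if !(nr_div_10 x) then false else list_elem_div_10 xs

def determinare_cea_mai_lunga_secv_v2 (lista : List Int) : List Int :=
  let lung_lista : Int := (lista.length : Int)
  (PySem.List.pyRange 0 lung_lista 1).foldl
    (fun rez i =>
      (PySem.List.pyRange i lung_lista 1).foldl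
        (fun rez j =>
          let list_de_verificat := PySem.List.slice lista (some i) (some (j + 1))
          if list_elem_div_10 list_de_verificat
              && decide (list_de_verificat.length > rez.length) then
            list_de_verificat
          else rez)
        rez)
    []

-- ===== PORT B =====
def determinare_cea_mai_lunga_secv_v2_alt (lista : List Int) : List Int :=
  (lista.foldl
    (fun (st : List Int × List Int) x =>
      if PySem.Int.mod x 10 == 0 then
        let cur := st.2 ++ [x]
        (if cur.length > st.1.length then cur else st.1, cur)
      else (st.1, []))
    ([], [])).1

-- ===== PRECONDITION & SPEC =====
def Spec_determinare_cea_mai_lunga_secv_v2 (lista : List Int) (out : List Int) : Prop := out = determinare_cea_mai_lunga_secv_v2_alt lista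
instance (lista : List Int) (out : List Int) : Decidable (Spec_determinare_cea_mai_lunga_secv_v2 lista out) := by unfold Spec_determinare_cea_mai_lunga_secv_v2; infer_instance

-- ===== CLAIM (what is proved, stated in full; the proofs are below) =====
def Claim_equal_determinare_cea_mai_lunga_secv_v2 : Prop := ∀ (lista : List Int), Dom_determinare_cea_mai_lunga_secv_v2 lista → Spec_determinare_cea_mai_lunga_secv_v2 lista (determinare_cea_mai_lunga_secv_v2 lista)

-- ===== LEMMAS AND PROOFS =====

/-- "challenge": keep the longer of the current best `b` and a new candidate `c`,
preferring the current best on ties (Python's strict `>`). -/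
def pvCh (b c : List Int) : List Int := if c.length > b.length then c else b

/-- longest all-divisible-by-10 prefix. -/
def pvDp : List Int → List Int
  | [] => []
  | x :: xs => if nr_div_10 x then x :: pvDp xs else []

/-- what follows the leading run of multiples of 10. -/
def pvAfter : List Int → List Int
  | [] => []
  | x :: xs => if nr_div_10 x then pvAfter xs else x :: xs

/-- best run recorded by a left-to-right pass with pending run `c` (the spec both ports meet). -/
def pvM : List Int → List Int → List Int
  | _, [] => []
  | c, x :: xs => if nr_div_10 x then pvCh (c ++ [x]) (pvM (c ++ [x]) xs) else pvM [] xs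

/-- best run, as A's outer loop sees it: challenge with the leading run of every suffix. -/
def pvN : List Int → List Int
  | [] => []
  | x :: xs => pvCh (pvDp (x :: xs)) (pvN xs)

/-- A's outer loop as a recursion on suffixes. -/
def pvO : List Int → List Int → List Int
  | b, [] => b
  | b, x :: xs => pvO (pvCh b (pvDp (x :: xs))) xs

lemma pvCh_nil_left (m : List Int) : pvCh [] m = m := by
  cases m <;> simp [pvCh]

lemma pvCh_assoc (b c m : List Int) : pvCh b (pvCh c m) = pvCh (pvCh b c) m := by
  unfold pvCh; split_ifs <;> first | rfl | omega

lemma pvCh_left (b c : List Int) (h : c.length ≤ b.length) : pvCh b c = b := by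
  simp [pvCh]; omega

lemma pvCh_big (b c : List Int) (h : b.length < c.length) : pvCh b c = c := by
  simp [pvCh, h]

lemma pvDp_length_le (l : List Int) : (pvDp l).length ≤ l.length := by
  induction l with
  | nil => simp [pvDp]
  | cons x xs ih => simp only [pvDp]; split <;> simp <;> omega

lemma list_elem_div_10_take (d : List Int) :
    ∀ m : Nat, m ≤ d.length → list_elem_div_10 (d.take m) = decide (m ≤ (pvDp d).length) := by
  induction d with
  | nil =>
    intro m hm
    simp only [List.length_nil, Nat.le_zero] at hm
    subst hm; simp [list_elem_div_10, pvDp]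
  | cons x xs ih =>
    intro m hm
    cases m with
    | zero => simp [list_elem_div_10]
    | succ m =>
      simp only [List.take_succ_cons, list_elem_div_10, pvDp]
      by_cases hx : nr_div_10 x
      · simp only [hx, Bool.not_true, Bool.false_eq_true, if_false, if_true]
        rw [ih m (by simpa using hm)]
        simp
      · simp [hx]

lemma take_pvDp (d : List Int) :
    ∀ m : Nat, m ≤ (pvDp d).length → d.take m = (pvDp d).take m := by
  induction d with
  | nil => simp [pvDp]
  | cons x xs ih =>
    intro m hm
    by_cases hx : nr_div_10 x
    · simp only [pvDp, hx, if_true] at hm ⊢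
      cases m with
      | zero => simp
      | succ m => simp only [List.take_succ_cons]; rw [ih m (by simpa using hm)]
    · have hm0 : m = 0 := by simp [pvDp, hx] at hm; omega
      subst hm0; simp

lemma take_pvDp_all (d : List Int) : d.take (pvDp d).length = pvDp d := by
  rw [take_pvDp d _ le_rfl, List.take_length]

-- inner loop of A: challenging with all-divisible slices starting at i yields pvCh with the run at i
lemma pvInner (lista : List Int) (i : Nat) (hi : i ≤ lista.length) :
    ∀ (k j : Nat) (b : List Int), i ≤ j → lista.length ≤ j + k →
    (PySem.List.pyRange (j : Int) ((lista.length : Nat) : Int) 1).foldl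
      (fun rez j =>
        let list_de_verificat := PySem.List.slice lista (some (i : Int)) (some (j + 1))
        if list_elem_div_10 list_de_verificat
            && decide (list_de_verificat.length > rez.length) then
          list_de_verificat
        else rez)
      b
    = if j - i < (pvDp (lista.drop i)).length ∧ b.length < (pvDp (lista.drop i)).length
      then pvDp (lista.drop i) else b := by
  intro k
  induction k with
  | zero =>
    intro j b hij hk
    rw [PySem.List.pyRange_one_eq_nil
      (show ((lista.length : Nat) : Int) ≤ (j : Int) by exact_mod_cast hk)]
    simp only [List.foldl_nil]
    rw [if_neg]
    rintro ⟨hcon, -⟩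
    have hle := pvDp_length_le (lista.drop i)
    rw [List.length_drop] at hle
    omega
  | succ k ih =>
    intro j b hij hk
    by_cases hj : lista.length ≤ j
    · rw [PySem.List.pyRange_one_eq_nil
        (show ((lista.length : Nat) : Int) ≤ (j : Int) by exact_mod_cast hj)]
      simp only [List.foldl_nil]
      rw [if_neg]
      rintro ⟨hcon, -⟩
      have hle := pvDp_length_le (lista.drop i)
      rw [List.length_drop] at hle
      omega
    · have hj' : j < lista.length := by omega
      rw [PySem.List.pyRange_one_cons
        (show (j : Int) < ((lista.length : Nat) : Int) by exact_mod_cast hj')]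
      simp only [List.foldl_cons]
      have hslice : PySem.List.slice lista (some (i : Int)) (some ((j : Int) + 1))
          = (lista.drop i).take (j + 1 - i) := by
        rw [show ((j : Int) + 1) = (((j + 1 : Nat)) : Int) by push_cast; ring,
          PySem.List.slice_natCast]
      have hdlen : (lista.drop i).length = lista.length - i := List.length_drop ..
      have hm : j + 1 - i ≤ (lista.drop i).length := by omega
      have hLlen : ((lista.drop i).take (j + 1 - i)).length = j + 1 - i := by
        rw [List.length_take]; omega
      have hguard := list_elem_div_10_take (lista.drop i) (j + 1 - i) hm
      have hcast : ((j : Int) + 1) = (((j + 1 : Nat)) : Int) := by push_cast; ring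
      rw [hslice, hguard, hLlen, hcast, ih (j + 1) _ (by omega) (by omega)]
      have hPd := pvDp_length_le (lista.drop i)
      by_cases h1 : j + 1 - i ≤ (pvDp (lista.drop i)).length
      · by_cases h2 : j + 1 - i > b.length
        · simp only [h1, h2, decide_true, Bool.and_self, if_true, hLlen]
          by_cases h3 : j + 1 - i = (pvDp (lista.drop i)).length
          · rw [h3, take_pvDp_all]
            split_ifs <;> first | rfl | omega
          · split_ifs with hc1 hc2 hc2
            · rfl
            · exfalso; omega
            · exfalso; omega
            · exfalso; omega
        · simp only [h1, h2, decide_true, decide_false, Bool.and_false, Bool.false_eq_true,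
            if_false]
          split_ifs <;> first | rfl | omega
      · simp only [h1, decide_false, Bool.false_and, Bool.false_eq_true, if_false]
        split_ifs <;> first | rfl | omega

lemma pvOuter (lista : List Int) :
    ∀ (k i : Nat) (b : List Int), i ≤ lista.length → lista.length ≤ i + k →
    (PySem.List.pyRange (i : Int) ((lista.length : Nat) : Int) 1).foldl
      (fun rez i =>
        (PySem.List.pyRange i ((lista.length : Nat) : Int) 1).foldl
          (fun rez j =>
            let list_de_verificat := PySem.List.slice lista (some i) (some (j + 1))
            if list_elem_div_10 list_de_verificat
                && decide (list_de_verificat.length > rez.length) then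
              list_de_verificat
            else rez)
          rez)
      b
    = pvO b (lista.drop i) := by
  intro k
  induction k with
  | zero =>
    intro i b h1 h2
    have hieq : i = lista.length := by omega
    subst hieq
    rw [PySem.List.pyRange_one_eq_nil (by exact_mod_cast le_refl _)]
    simp [pvO, List.drop_length]
  | succ k ih =>
    intro i b h1 h2
    by_cases hj : lista.length ≤ i
    · have hieq : i = lista.length := by omega
      subst hieq
      rw [PySem.List.pyRange_one_eq_nil (by exact_mod_cast le_refl _)]
      simp [pvO, List.drop_length]
    · have hi' : i < lista.length := by omega
      rw [PySem.List.pyRange_one_cons (show (i : Int) < ((lista.length : Nat) : Int) by exact_mod_cast hi')]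
      simp only [List.foldl_cons]
      rw [pvInner lista i (le_of_lt hi') lista.length i b le_rfl (by omega)]
      have hcast : ((i : Int) + 1) = (((i + 1 : Nat)) : Int) := by push_cast; ring
      rw [hcast, ih (i + 1) _ (by omega) (by omega)]
      have hdrop : lista.drop i = lista[i] :: lista.drop (i + 1) :=
        List.drop_eq_getElem_cons hi'
      rw [hdrop]
      have hch : (if i - i < (pvDp (lista[i] :: lista.drop (i + 1))).length ∧
            b.length < (pvDp (lista[i] :: lista.drop (i + 1))).length
          then pvDp (lista[i] :: lista.drop (i + 1)) else b)
          = pvCh b (pvDp (lista[i] :: lista.drop (i + 1))) := by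
        unfold pvCh; split_ifs <;> first | rfl | omega
      rw [hch]
      rfl

lemma pvO_eq : ∀ (l : List Int) (b : List Int), pvO b l = pvCh b (pvN l) := by
  intro l
  induction l with
  | nil => intro b; simp [pvO, pvN, pvCh]
  | cons x xs ih =>
    intro b
    simp only [pvO, pvN, ih, pvCh_assoc]

lemma pvM_nilctx (xs : List Int) (h : pvDp xs = []) (c : List Int) : pvM c xs = pvM [] xs := by
  cases xs with
  | nil => rfl
  | cons y ys =>
    by_cases hy : nr_div_10 y
    · simp [pvDp, hy] at h
    · simp [pvM, hy]

lemma pvK : ∀ (xs c : List Int), pvDp xs ≠ [] →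
    pvM c xs = pvCh (c ++ pvDp xs) (pvM [] (pvAfter xs)) := by
  intro xs
  induction xs with
  | nil => intro c h; simp [pvDp] at h
  | cons x xs ih =>
    intro c h
    by_cases hx : nr_div_10 x
    · simp only [pvM, pvDp, pvAfter, hx, if_true]
      by_cases hdp : pvDp xs = []
      · rw [pvM_nilctx xs hdp (c ++ [x])]
        cases xs with
        | nil => simp [pvM, pvAfter, pvCh, hdp]
        | cons y ys =>
          have hy : ¬ nr_div_10 y := by
            intro hy; simp [pvDp, hy] at hdp
          simp [pvM, pvAfter, hy, hdp]
      · have hlen : 0 < (pvDp xs).length := List.length_pos_of_ne_nil hdp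
        rw [ih (c ++ [x]) hdp, pvCh_assoc,
            pvCh_big (c ++ [x]) (c ++ [x] ++ pvDp xs) (by simp; omega)]
        have h2 : c ++ [x] ++ pvDp xs = c ++ (x :: pvDp xs) := by simp
        rw [h2]
    · simp [pvDp, hx] at h

lemma pvM_eq_pvN : ∀ xs : List Int, pvM [] xs = pvN xs := by
  intro xs
  induction xs with
  | nil => rfl
  | cons x xs ih =>
    by_cases hx : nr_div_10 x
    · simp only [pvM, pvN, pvDp, hx, if_true, List.nil_append]
      by_cases hdp : pvDp xs = []
      · rw [pvM_nilctx xs hdp [x], ih, hdp]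
      · have hlen : 0 < (pvDp xs).length := List.length_pos_of_ne_nil hdp
        rw [pvK xs [x] hdp, pvCh_assoc,
            pvCh_big [x] ([x] ++ pvDp xs) (by simp; omega),
            ← ih, pvK xs [] hdp, pvCh_assoc,
            pvCh_left (x :: pvDp xs) ([] ++ pvDp xs) (by simp)]
        simp
    · rw [show pvM [] (x :: xs) = pvM [] xs from by simp [pvM, hx], ih,
          show pvN (x :: xs) = pvCh (pvDp (x :: xs)) (pvN xs) from rfl]
      simp [pvDp, hx, pvCh_nil_left]

lemma pvAlt : ∀ (l : List Int) (b c : List Int),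
    (l.foldl
      (fun (st : List Int × List Int) x =>
        if PySem.Int.mod x 10 == 0 then
          let cur := st.2 ++ [x]
          (if cur.length > st.1.length then cur else st.1, cur)
        else (st.1, []))
      (b, c)).1 = pvCh b (pvM c l) := by
  intro l
  induction l with
  | nil => intro b c; simp [pvM, pvCh]
  | cons x xs ih =>
    intro b c
    by_cases hx : nr_div_10 x
    · have hx' : (PySem.Int.mod x 10 == 0) = true := hx
      simp only [List.foldl_cons, hx', if_true]
      rw [ih]
      simp only [pvM, hx, if_true]
      rw [pvCh_assoc]
      rfl
    · have hx' : ¬ ((PySem.Int.mod x 10 == 0) = true) := hx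
      simp only [List.foldl_cons, if_neg hx']
      rw [ih]
      simp [pvM, hx]

-- ===== VERDICT (by name: the statement is the Claim_ definition above) =====
theorem determinare_cea_mai_lunga_secv_v2_spec : Claim_equal_determinare_cea_mai_lunga_secv_v2 := by
  intro lista _
  unfold Spec_determinare_cea_mai_lunga_secv_v2
  unfold determinare_cea_mai_lunga_secv_v2 determinare_cea_mai_lunga_secv_v2_alt
  rw [pvAlt lista [] [], pvCh_nil_left, pvM_eq_pvN]
  have h := pvOuter lista lista.length 0 [] (Nat.zero_le _) (by omega)
  rw [List.drop_zero, pvO_eq, pvCh_nil_left] at h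
  simp only [Nat.cast_zero] at h
  exact h
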